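-- pv_equiv track=rewrite | github.com/isLinXu/CVProcessLib | core/math/hx_math.py | find_minx
-- ===== SOURCE A (Python) =====
-- def find_minx(y_list, y_value, x_list):
--     finally_pos = 0
--     min_x = 10000
--     for i in range(y_list.count(y_value)):
--         next_pos = y_list.index(y_value)
--         x = x_list[finally_pos + next_pos]
--         if min_x > x:
--             min_x = x
--         first_pos = next_pos + 1
--         finally_pos += first_pos
--         y_list = y_list[first_pos:]
--     return min_x
-- ===== SOURCE B (Python) =====
-- def find_minx(y_list, y_value, x_list):
--     min_x = 10000
--     for i, y in enumerate(y_list):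
--         if y == y_value:
--             x = x_list[i]
--             if x < min_x:
--                 min_x = x
--     return min_x
-- ===== Notes on version B (the rewrite author's own statement) =====
-- stated objective: simpler
-- what changed: Replaces A's repeated count/index rescans and list slicing with one enumerate pass that tracks the running minimum directly.
-- outside the precondition, e.g. on find_minx([1], 1, []): A raises IndexError, B raises IndexError
import Mathlib
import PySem

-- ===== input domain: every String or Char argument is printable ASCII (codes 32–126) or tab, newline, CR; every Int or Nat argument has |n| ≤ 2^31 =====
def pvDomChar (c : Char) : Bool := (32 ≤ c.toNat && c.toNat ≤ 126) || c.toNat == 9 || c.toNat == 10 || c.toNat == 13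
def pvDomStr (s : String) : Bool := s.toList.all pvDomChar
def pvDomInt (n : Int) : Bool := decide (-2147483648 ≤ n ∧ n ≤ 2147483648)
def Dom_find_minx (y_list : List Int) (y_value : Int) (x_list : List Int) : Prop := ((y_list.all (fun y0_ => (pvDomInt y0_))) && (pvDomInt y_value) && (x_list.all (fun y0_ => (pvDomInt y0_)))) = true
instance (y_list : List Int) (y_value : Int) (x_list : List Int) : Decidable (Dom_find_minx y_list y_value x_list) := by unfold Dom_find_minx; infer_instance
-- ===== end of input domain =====

-- B replaces A's repeated count/index rescans and slicing with a single enumerate pass tracking the minimum (simpler).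


-- ===== PORT A =====
-- loop body of A: n remaining iterations (range(count)), finally_pos, min_x, the shrinking y_list
def find_minx_loopA (y_value : Int) (x_list : List Int) : Nat → Nat → Int → List Int → Int
  | 0, _, min_x, _ => min_x
  | n+1, finally_pos, min_x, ys =>
    match PySem.List.index? ys y_value with
    | none => min_x  -- unreachable: count iterations guarantee a hit
    | some next_pos =>
      -- x_list[finally_pos + next_pos]: IndexError excluded by Pre_; default 0 is never read there
      let x := PySem.List.pyGetD x_list ((finally_pos + next_pos : Nat) : Int) 0
      let min_x' := if min_x > x then x else min_x
      find_minx_loopA y_value x_list n (finally_pos + (next_pos + 1)) min_x'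
        (PySem.List.slice ys (some ((next_pos + 1 : Nat) : Int)) none)

def find_minx (y_list : List Int) (y_value : Int) (x_list : List Int) : Int :=
  find_minx_loopA y_value x_list (PySem.List.count y_list y_value) 0 10000 y_list

-- ===== PORT B =====
def find_minx_alt (y_list : List Int) (y_value : Int) (x_list : List Int) : Int :=
  (PySem.List.enumerate y_list 0).foldl
    (fun min_x p =>
      if p.2 = y_value then
        let x := PySem.List.pyGetD x_list p.1 0  -- x_list[i]: IndexError excluded by Pre_
        if x < min_x then x else min_x
      else min_x) 10000

-- ===== PRECONDITION & SPEC =====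
-- Pre_ excludes exactly the inputs where Python A raises IndexError: a position where
-- y_list matches y_value but x_list is too short to be indexed there.
def Pre_find_minx (y_list : List Int) (y_value : Int) (x_list : List Int) : Prop :=
  ∀ k, k < y_list.length → y_list.getD k 0 = y_value → k < x_list.length
instance (y_list : List Int) (y_value : Int) (x_list : List Int) : Decidable (Pre_find_minx y_list y_value x_list) := by unfold Pre_find_minx; infer_instance

def pvWitness_find_minx : List Int × Int × List Int := ([1, 2, 1], 1, [5, 3, 7])

def Spec_find_minx (y_list : List Int) (y_value : Int) (x_list : List Int) (out : Int) : Prop := out = find_minx_alt y_list y_value x_list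
instance (y_list : List Int) (y_value : Int) (x_list : List Int) (out : Int) : Decidable (Spec_find_minx y_list y_value x_list out) := by unfold Spec_find_minx; infer_instance

-- ===== CLAIM (what is proved, stated in full; the proofs are below) =====
def Claim_equal_find_minx : Prop := ∀ (y_list : List Int) (y_value : Int) (x_list : List Int), Dom_find_minx y_list y_value x_list → Pre_find_minx y_list y_value x_list → Spec_find_minx y_list y_value x_list (find_minx y_list y_value x_list)

-- ===== LEMMAS AND PROOFS =====

-- shift lemma: a non-matching head only shifts the position offset by one
theorem find_minx_loopA_cons_ne (y_value : Int) (x_list : List Int) (y : Int) (ys : List Int)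
    (hy : y ≠ y_value) (n fp : Nat) (m : Int) :
    find_minx_loopA y_value x_list n fp m (y :: ys) = find_minx_loopA y_value x_list n (fp + 1) m ys := by
  cases n with
  | zero => rfl
  | succ n =>
    rw [find_minx_loopA, find_minx_loopA, PySem.List.index?_cons_of_ne _ hy]
    cases h : PySem.List.index? ys y_value with
    | none => rfl
    | some p =>
      simp only [Option.map_some]
      rw [PySem.List.slice_from_natCast, PySem.List.slice_from_natCast, List.drop_succ_cons,
        show fp + (p + 1 + 1) = fp + 1 + (p + 1) from by omega,
        show fp + (p + 1) = fp + 1 + p from by omega]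

-- main invariant: A's loop over the remaining list equals B's fold with the position offset
theorem find_minx_loop_eq (y_value : Int) (x_list : List Int) (ys : List Int) :
    ∀ (fp : Nat) (m : Int),
      find_minx_loopA y_value x_list (PySem.List.count ys y_value) fp m ys =
      (PySem.List.enumerate ys (fp : Int)).foldl
        (fun min_x p =>
          if p.2 = y_value then
            let x := PySem.List.pyGetD x_list p.1 0
            if x < min_x then x else min_x
          else min_x) m := by
  induction ys with
  | nil => intro fp m; simp [PySem.List.count, find_minx_loopA, PySem.List.enumerate_nil]
  | cons y ys ih =>
    intro fp m
    rw [PySem.List.enumerate_cons, List.foldl_cons]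
    by_cases hy : y = y_value
    · subst hy
      have hc : PySem.List.count (y :: ys) y = PySem.List.count ys y + 1 := by
        simp [PySem.List.count]
      rw [hc, find_minx_loopA, PySem.List.index?_cons_self]
      dsimp only
      rw [PySem.List.slice_from_natCast, List.drop_succ_cons, List.drop_zero,
        show fp + (0 + 1) = fp + 1 from by omega, ih,
        show ((fp + 1 : Nat) : Int) = (fp : Int) + 1 from by push_cast; ring]
      simp [gt_iff_lt]
    · have hc : PySem.List.count (y :: ys) y_value = PySem.List.count ys y_value := by
        simp [PySem.List.count, hy]
      rw [hc, find_minx_loopA_cons_ne _ _ _ _ hy, ih (fp + 1) m,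
        show ((fp + 1 : Nat) : Int) = (fp : Int) + 1 from by push_cast; ring, if_neg hy]

-- ===== VERDICT (by name: the statement is the Claim_ definition above) =====
theorem find_minx_spec : Claim_equal_find_minx := by
  intro y_list y_value x_list _ _
  unfold Spec_find_minx find_minx find_minx_alt
  simpa using find_minx_loop_eq y_value x_list y_list 0 10000
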